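-- pv_equiv track=rewrite | github.com/reginaib/Programming | Series_06/chocolate_game_lists.py | chocolate_bars
-- ===== SOURCE A (Python) =====
-- def chocolate_bars(bars):
--     """
--     >>> chocolate_bars([2, 9, 8, 2, 7])
--     (2, 3)
--     >>> chocolate_bars([1, 2, 3, 4, 3, 2, 1])
--     (4, 3)
--     """
--     # number of bar that Alica and Bob has eaten so far
--     alice, bob = [], []
--
--     # Alice and Bob progressively eat all the bars
--     for _ in range(len(bars)):
--         # decide whether Alice or Bob eats the next bar
--         if sum(alice) <= sum(bob):
--             # Alice can eat her next bar
--             alice.append(bars.pop(0))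
--         else:
--             # Bob eats his next bar
--             bob.append(bars.pop())
--
--     # return of bars that Alice and Bob have eaten at the end of the game
--     return len(alice), len(bob)
-- ===== SOURCE B (Python) =====
-- def chocolate_bars(bars):
--     # Two pointers with running sums; does not mutate bars (A empties it).
--     i, j = 0, len(bars) - 1
--     sa = sb = ca = cb = 0
--     while i <= j:
--         if sa <= sb:
--             sa += bars[i]
--             ca += 1
--             i += 1
--         else:
--             sb += bars[j]
--             cb += 1
--             j -= 1
--     return ca, cb
-- ===== Notes on version B (the rewrite author's own statement) =====
-- stated objective: faster
-- what changed: Replaces the simulation that recomputes sum(alice)/sum(bob) and pops from a shrinking list each round with a single two-pointer pass keeping running sums and counts (and leaving the input list unmutated).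
import Mathlib
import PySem

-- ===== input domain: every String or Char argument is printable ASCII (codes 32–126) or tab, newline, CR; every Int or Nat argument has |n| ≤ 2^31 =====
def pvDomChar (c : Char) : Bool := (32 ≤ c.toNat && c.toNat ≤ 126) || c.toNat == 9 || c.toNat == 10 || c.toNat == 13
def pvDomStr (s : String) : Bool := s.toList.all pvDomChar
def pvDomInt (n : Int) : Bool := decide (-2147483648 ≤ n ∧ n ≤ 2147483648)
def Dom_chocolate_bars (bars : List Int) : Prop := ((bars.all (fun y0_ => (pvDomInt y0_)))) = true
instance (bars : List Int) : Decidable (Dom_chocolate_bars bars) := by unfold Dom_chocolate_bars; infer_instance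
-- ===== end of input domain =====

-- B replaces A's O(n^2) re-summing/pop simulation with a two-pointer O(n) pass over running
-- sums; equivalence is about the RETURN value only (A empties its argument list, B does not).


-- ===== PORT A =====
-- A's loop runs len(bars) times, each round popping one element from the front or the back
-- of the remaining list; the fuel equals the remaining list's length at every step, so
-- `headD 0` / `getLastD 0` are exact (the raising case of pop on [] is never reached).
def chocolateBarsLoopA : Nat → List Int → List Int → List Int → Int × Int
  | 0, _, alice, bob => ((alice.length : Int), (bob.length : Int))
  | f + 1, rem, alice, bob =>
    if alice.sum ≤ bob.sum then
      chocolateBarsLoopA f rem.tail (alice ++ [rem.headD 0]) bob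
    else
      chocolateBarsLoopA f rem.dropLast alice (bob ++ [rem.getLastD 0])

def chocolate_bars (bars : List Int) : Int × Int :=
  chocolateBarsLoopA bars.length bars [] []

-- ===== PORT B =====
-- B's while loop; bars[i] / bars[j] are in range whenever read (0 ≤ i ≤ j < len), so the
-- `.getD 0` after PySem.List.pyGet? is exact.
def chocolateBarsLoopB (bars : List Int) (sa sb ca cb i j : Int) : Int × Int :=
  if h : i ≤ j then
    if sa ≤ sb then
      chocolateBarsLoopB bars (sa + (PySem.List.pyGet? bars i).getD 0) sb (ca + 1) cb (i + 1) j
    else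
      chocolateBarsLoopB bars sa (sb + (PySem.List.pyGet? bars j).getD 0) ca (cb + 1) i (j - 1)
  else (ca, cb)
termination_by (j + 1 - i).toNat
decreasing_by all_goals omega

def chocolate_bars_alt (bars : List Int) : Int × Int :=
  chocolateBarsLoopB bars 0 0 0 0 0 ((bars.length : Int) - 1)

-- ===== PRECONDITION & SPEC =====
def Spec_chocolate_bars (bars : List Int) (out : Int × Int) : Prop := out = chocolate_bars_alt bars
instance (bars : List Int) (out : Int × Int) : Decidable (Spec_chocolate_bars bars out) := by unfold Spec_chocolate_bars; infer_instance

-- ===== CLAIM (what is proved, stated in full; the proofs are below) =====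
def Claim_equal_chocolate_bars : Prop := ∀ (bars : List Int), Dom_chocolate_bars bars → Spec_chocolate_bars bars (chocolate_bars bars)

-- ===== LEMMAS AND PROOFS =====

-- Common abstract recursion: eat the remaining list `rem` from either end, carrying the two
-- running sums and the two counts.
def gEat : List Int → Int → Int → Int → Int → Int × Int
  | [], _, _, ca, cb => (ca, cb)
  | x :: rest, sa, sb, ca, cb =>
    if sa ≤ sb then gEat rest (sa + x) sb (ca + 1) cb
    else gEat ((x :: rest).dropLast) sa (sb + (x :: rest).getLastD 0) ca (cb + 1)
termination_by l => l.length
decreasing_by all_goals simp [List.length_dropLast]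

lemma loopA_eq_gEat : ∀ (n : Nat) (rem alice bob : List Int), rem.length = n →
    chocolateBarsLoopA n rem alice bob
      = gEat rem alice.sum bob.sum alice.length bob.length := by
  intro n
  induction n with
  | zero =>
    intro rem alice bob h
    have : rem = [] := List.eq_nil_of_length_eq_zero h
    subst this
    simp [chocolateBarsLoopA, gEat]
  | succ f ih =>
    intro rem alice bob h
    match rem with
    | [] => simp at h
    | x :: rest =>
      have hrest : rest.length = f := by simpa using h
      simp only [chocolateBarsLoopA, List.tail_cons, List.headD_cons]
      by_cases hle : alice.sum ≤ bob.sum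
      · rw [if_pos hle, ih rest (alice ++ [x]) bob hrest]
        have hrhs : gEat (x :: rest) alice.sum bob.sum (alice.length : Int) (bob.length : Int)
            = gEat rest (alice.sum + x) bob.sum ((alice.length : Int) + 1) (bob.length : Int) := by
          simp [gEat, hle]
        rw [hrhs]
        congr 1
        · simp [List.sum_append]
        · simp [List.length_append]
      · rw [if_neg hle, ih ((x :: rest).dropLast) alice (bob ++ [(x :: rest).getLastD 0])
              (by simp [List.length_dropLast] at h ⊢; omega)]
        have hrhs : gEat (x :: rest) alice.sum bob.sum (alice.length : Int) (bob.length : Int)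
            = gEat ((x :: rest).dropLast) alice.sum (bob.sum + (x :: rest).getLastD 0)
                (alice.length : Int) ((bob.length : Int) + 1) := by
          rw [gEat]; rw [if_neg hle]
        rw [hrhs]
        congr 1
        · simp [List.sum_append]
        · simp [List.length_append]

lemma loopB_eq_gEat : ∀ (n : Nat) (pre mid post : List Int) (sa sb ca cb : Int),
    mid.length = n →
    chocolateBarsLoopB (pre ++ mid ++ post) sa sb ca cb (pre.length : Int)
        ((pre.length : Int) + (mid.length : Int) - 1)
      = gEat mid sa sb ca cb := by
  intro n
  induction n with
  | zero =>
    intro pre mid post sa sb ca cb h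
    have : mid = [] := List.eq_nil_of_length_eq_zero h
    subst this
    rw [chocolateBarsLoopB]
    simp [gEat]
  | succ f ih =>
    intro pre mid post sa sb ca cb h
    match mid with
    | [] => simp at h
    | x :: rest =>
      have hrest : rest.length = f := by simpa using h
      have hmlen : (((x :: rest).length : Nat) : Int) = (rest.length : Int) + 1 := by
        push_cast [List.length_cons]; ring
      rw [chocolateBarsLoopB]
      have hij : (pre.length : Int) ≤ (pre.length : Int) + (((x :: rest).length : Nat) : Int) - 1 := by
        rw [hmlen]; omega
      rw [dif_pos hij]
      by_cases hle : sa ≤ sb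
      · rw [if_pos hle]
        have hget : (PySem.List.pyGet? (pre ++ (x :: rest) ++ post) (pre.length : Int)).getD 0 = x := by
          rw [PySem.List.pyGet?_natCast]
          simp
        rw [hget]
        have key := ih (pre ++ [x]) rest post (sa + x) sb (ca + 1) cb hrest
        rw [show pre ++ [x] ++ rest ++ post = pre ++ (x :: rest) ++ post by simp] at key
        rw [show (((pre ++ [x]).length : Nat) : Int) = (pre.length : Int) + 1 by
              simp [List.length_append]] at key
        rw [show (pre.length : Int) + (((x :: rest).length : Nat) : Int) - 1
              = (pre.length : Int) + 1 + (rest.length : Int) - 1 by rw [hmlen]; ring]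
        rw [key]
        rw [show gEat (x :: rest) sa sb ca cb = gEat rest (sa + x) sb (ca + 1) cb by
              rw [gEat]; rw [if_pos hle]]
      · rw [if_neg hle]
        obtain ⟨ys, y, hy⟩ : ∃ ys y, x :: rest = ys ++ [y] := by
          refine ⟨(x :: rest).dropLast, (x :: rest).getLast (by simp), ?_⟩
          exact (List.dropLast_append_getLast (by simp)).symm
        have hys : ys.length = f := by
          have := congrArg List.length hy; simp at this; omega
        have hylen : (((x :: rest).length : Nat) : Int) = (ys.length : Int) + 1 := by
          have := congrArg List.length hy; simp at this; omega
        have hget : (PySem.List.pyGet? (pre ++ (x :: rest) ++ post)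
            ((pre.length : Int) + (((x :: rest).length : Nat) : Int) - 1)).getD 0 = y := by
          rw [show (pre.length : Int) + (((x :: rest).length : Nat) : Int) - 1
                = (((pre.length + ys.length : Nat)) : Int) by rw [hylen]; push_cast; ring]
          rw [PySem.List.pyGet?_natCast]
          rw [hy, show pre ++ (ys ++ [y]) ++ post = (pre ++ ys) ++ ([y] ++ post) by simp]
          rw [List.getElem?_append_right (by simp)]
          simp
        rw [hget]
        have key := ih pre ys (y :: post) sa (sb + y) ca (cb + 1) hys
        rw [show pre ++ ys ++ (y :: post) = pre ++ (x :: rest) ++ post by rw [hy]; simp] at key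
        rw [show (pre.length : Int) + (((x :: rest).length : Nat) : Int) - 1 - 1
              = (pre.length : Int) + (ys.length : Int) - 1 by rw [hylen]; ring]
        rw [key]
        have hdl : (x :: rest).dropLast = ys := by rw [hy]; simp
        have hgl : (x :: rest).getLastD 0 = y := by rw [hy]; simp
        rw [show gEat (x :: rest) sa sb ca cb
              = gEat ys sa (sb + y) ca (cb + 1) by rw [gEat, if_neg hle, hdl, hgl]]

theorem chocolate_bars_spec : Claim_equal_chocolate_bars := by
  unfold Claim_equal_chocolate_bars
  intro bars _
  unfold Spec_chocolate_bars chocolate_bars chocolate_bars_alt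
  rw [loopA_eq_gEat bars.length bars [] [] rfl]
  have := loopB_eq_gEat bars.length [] bars [] 0 0 0 0 rfl
  simpa using this.symm
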